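-- pv_equiv track=rewrite | github.com/voschezang/mash | src/util.py | list_prefix_matches
-- ===== SOURCE A (Python) =====
-- from typing import Any, Callable, Dict, Iterable, List, Literal, Sequence, Tuple, TypeVar, Union
--
-- def list_prefix_matches(element: str, elements: List[str]):
--     """Yields all elements that are equal to a prefix of `element`.
--     Elements with better matches are chosen first.
--     """
--     prev_matches = set()
--     for i in range(max(1, len(element)), 0, -1):
--         prefix = element[:i]
--         for other in elements:
--             if other in prev_matches:
--                 continue
--
--             if other.startswith(prefix):
--                 prev_matches |= {other}
--                 yield other
-- ===== SOURCE B (Python) =====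
-- def list_prefix_matches(element, elements):
--     """Yields all elements that are equal to a prefix of `element`.
--     Elements with better matches are chosen first.
--
--     One pass: dedup, score each element by its common-prefix length with
--     `element`, drop non-matches, then emit buckets from best score down.
--     """
--     best = max(1, len(element))
--     buckets = {}
--     seen = set()
--     for other in elements:
--         if other not in seen:
--             seen.add(other)
--             if other.startswith(element[:1]):
--                 m = 0
--                 for x, y in zip(other, element):
--                     if x != y:
--                         break
--                     m += 1
--                 buckets.setdefault(max(1, m), []).append(other)
--     for i in range(best, 0, -1):
--         yield from buckets.get(i, [])
-- ===== Notes on version B (the rewrite author's own statement) =====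
-- stated objective: faster
-- what changed: Instead of rescanning the whole list once per prefix length (each scan doing a startswith of that length), B makes one pass over the elements computing each distinct element's common-prefix length with `element` and groups them into buckets, then emits buckets from best score down.
import Mathlib
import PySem

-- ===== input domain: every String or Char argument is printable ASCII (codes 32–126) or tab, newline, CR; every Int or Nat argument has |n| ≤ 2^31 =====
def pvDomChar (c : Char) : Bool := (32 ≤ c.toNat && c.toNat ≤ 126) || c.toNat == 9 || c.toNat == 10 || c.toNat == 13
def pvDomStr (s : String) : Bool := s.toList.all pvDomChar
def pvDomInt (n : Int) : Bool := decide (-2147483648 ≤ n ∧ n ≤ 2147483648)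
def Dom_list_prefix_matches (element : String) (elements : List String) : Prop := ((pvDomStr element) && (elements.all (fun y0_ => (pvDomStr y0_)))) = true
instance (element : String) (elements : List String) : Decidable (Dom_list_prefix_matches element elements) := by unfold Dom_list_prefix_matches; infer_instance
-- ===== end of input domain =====

-- B replaces A's per-prefix-length rescans of the list by a single scoring pass plus buckets
-- (objective: faster; A is a generator — the equivalence is about the list of yielded values).

-- ===== PORT A =====
def list_prefix_matches (element : String) (elements : List String) : List String :=
  ((PySem.List.pyRange (max 1 (PySem.Str.len element)) 0 (-1)).foldl
    (fun (st : PySem.Set String × List String) i =>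
      let pre := PySem.Str.slice element none (some i)
      elements.foldl
        (fun (st : PySem.Set String × List String) other =>
          if PySem.Set.contains st.1 other then st
          else if PySem.Str.startswith other pre then
            (PySem.Set.add st.1 other, st.2 ++ [other])
          else st) st)
    (PySem.Set.empty, [])).2

-- ===== PORT B =====
-- helper: the inner zip loop of Source B computing the common-prefix length with an accumulator
def lpmLcp : List Char → List Char → Int → Int
  | x :: xs, y :: ys, m => if x ≠ y then m else lpmLcp xs ys (m + 1)
  | _, _, m => m

def list_prefix_matches_alt (element : String) (elements : List String) : List String :=
  let best : Int := max 1 (PySem.Str.len element)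
  let st := elements.foldl
    (fun (st : PySem.Set String × PySem.Dict Int (List String)) other =>
      if PySem.Set.contains st.1 other then st
      else
        let seen := PySem.Set.add st.1 other
        if PySem.Str.startswith other (PySem.Str.slice element none (some 1)) then
          let m := lpmLcp other.toList element.toList 0
          (seen, st.2.modify (max 1 m) [] (· ++ [other]))
        else (seen, st.2))
    (PySem.Set.empty, PySem.Dict.empty)
  (PySem.List.pyRange best 0 (-1)).foldl (fun acc i => acc ++ st.2.getD i []) []

-- ===== PRECONDITION & SPEC =====
def Spec_list_prefix_matches (element : String) (elements : List String) (out : List String) : Prop := out = list_prefix_matches_alt element elements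
instance (element : String) (elements : List String) (out : List String) : Decidable (Spec_list_prefix_matches element elements out) := by unfold Spec_list_prefix_matches; infer_instance

-- ===== CLAIM (what is proved, stated in full; the proofs are below) =====
def Claim_equal_list_prefix_matches : Prop := ∀ (element : String) (elements : List String), Dom_list_prefix_matches element elements → Spec_list_prefix_matches element elements (list_prefix_matches element elements)

-- ===== LEMMAS AND PROOFS =====

-- common-prefix length, structurally
def lcpN : List Char → List Char → Nat
  | x :: xs, y :: ys => if x = y then lcpN xs ys + 1 else 0
  | _, _ => 0

lemma lpmLcp_eq_lcpN : ∀ (o e : List Char) (m : Int), lpmLcp o e m = m + (lcpN o e : Int) := by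
  intro o
  induction o with
  | nil => intro e m; cases e <;> simp [lpmLcp, lcpN]
  | cons x xs ih =>
    intro e m
    cases e with
    | nil => simp [lpmLcp, lcpN]
    | cons y ys =>
      by_cases h : x = y
      · simp [lpmLcp, lcpN, h, ih]; ring
      · simp [lpmLcp, lcpN, h]

lemma lcpN_le : ∀ (o e : List Char), lcpN o e ≤ e.length := by
  intro o
  induction o with
  | nil => intro e; cases e <;> simp [lcpN]
  | cons x xs ih =>
    intro e
    cases e with
    | nil => simp [lcpN]
    | cons y ys =>
      by_cases h : x = y
      · simpa [lcpN, h] using ih ys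
      · simp [lcpN, h]

lemma prefix_take_iff : ∀ (e o : List Char) (k : Nat),
    e.take k <+: o ↔ min k e.length ≤ lcpN o e := by
  intro e
  induction e with
  | nil => intro o k; simp [lcpN]
  | cons y ys ih =>
    intro o k
    cases k with
    | zero => simp
    | succ k =>
      cases o with
      | nil =>
        rw [List.take_succ_cons]
        constructor
        · intro h; exact absurd (List.eq_nil_of_prefix_nil h) (by simp)
        · intro h
          exfalso
          have h0 : lcpN [] (y :: ys) = 0 := rfl
          simp only [h0, List.length_cons] at h
          omega
      | cons x xs =>
        rw [List.take_succ_cons]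
        by_cases hxy : x = y
        · subst hxy
          have hl : lcpN (x :: xs) (x :: ys) = lcpN xs ys + 1 := by simp [lcpN]
          rw [hl, List.cons_prefix_cons]
          have hys := ih xs k
          simp only [List.length_cons, true_and]
          rw [hys]
          constructor <;> intro h <;> omega
        · have hl : lcpN (x :: xs) (y :: ys) = 0 := by simp [lcpN, hxy]
          rw [hl, List.cons_prefix_cons]
          simp only [List.length_cons]
          constructor
          · rintro ⟨h, -⟩; exact absurd h.symm hxy
          · intro h; exfalso; omega

lemma startswith_take (o e : List Char) (k : Nat) :
    PySem.Chars.startswith o (e.take k) = decide (min k e.length ≤ lcpN o e) := by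
  have hiff := PySem.Chars.startswith_iff o (e.take k)
  rw [prefix_take_iff] at hiff
  rcases h : PySem.Chars.startswith o (e.take k) with _ | _
  · have : ¬ (min k e.length ≤ lcpN o e) := fun hm => by
      rw [← hiff] at hm; exact absurd hm (by simp [h])
    simp [this]
  · simp [hiff.mp h]

-- first occurrences of l that are not in `seen`
def firstOccs : List String → List String → List String
  | [], _ => []
  | o :: rest, seen =>
      if seen.contains o then firstOccs rest seen else o :: firstOccs rest (seen ++ [o])

lemma firstOccs_congr : ∀ (l seen seen' : List String),
    (∀ x, seen.contains x = seen'.contains x) → firstOccs l seen = firstOccs l seen' := by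
  intro l
  induction l with
  | nil => intro _ _ _; rfl
  | cons o rest ih =>
    intro seen seen' h
    simp only [firstOccs, h o]
    by_cases hc : seen'.contains o = true
    · simp only [if_pos hc]; exact ih _ _ h
    · simp only [if_neg hc]
      have hx : ∀ x, (seen ++ [o]).contains x = (seen' ++ [o]).contains x := by
        intro x
        have hsx := h x
        simp only [List.contains_eq_mem] at hsx ⊢
        have hiff : x ∈ seen ↔ x ∈ seen' := by
          constructor <;> intro hm <;> [skip; skip] <;> simp_all
        have : (x ∈ seen ++ [o]) ↔ (x ∈ seen' ++ [o]) := by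
          simp only [List.mem_append, hiff]
        rw [decide_eq_decide]
        exact this
      rw [ih _ _ hx]

lemma mem_firstOccs : ∀ (l seen : List String) (x : String),
    x ∈ firstOccs l seen ↔ (x ∈ l ∧ x ∉ seen) := by
  intro l
  induction l with
  | nil => intro seen x; simp [firstOccs]
  | cons o rest ih =>
    intro seen x
    simp only [firstOccs]
    by_cases hc : seen.contains o = true
    · rw [if_pos hc, ih]
      have ho : o ∈ seen := by simpa using hc
      constructor
      · rintro ⟨h1, h2⟩; exact ⟨List.mem_cons_of_mem _ h1, h2⟩
      · rintro ⟨h1, h2⟩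
        rcases List.mem_cons.mp h1 with rfl | h1
        · exact absurd ho h2
        · exact ⟨h1, h2⟩
    · rw [if_neg hc]
      have ho : o ∉ seen := by simpa using hc
      have hmem : ∀ z : String, z ∈ seen ++ [o] ↔ (z ∈ seen ∨ z = o) := by
        intro z; simp
      simp only [List.mem_cons, ih, hmem]
      by_cases hxo : x = o
      · subst hxo; simp [ho]
      · simp only [hxo, false_or, or_false]

lemma firstOccs_append_left : ∀ (l s t : List String),
    firstOccs l (s ++ t) = (firstOccs l t).filter (fun x => !s.contains x) := by
  intro l
  induction l with
  | nil => intro _ _; rfl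
  | cons o rest ih =>
    intro s t
    simp only [firstOccs]
    by_cases ht : t.contains o = true
    · rw [if_pos (by simp_all), if_pos ht]; exact ih s t
    · rw [if_neg ht]
      by_cases hs : s.contains o = true
      · rw [if_pos (by simp_all)]
        rw [List.filter_cons, hs]
        simp only [Bool.not_true, if_neg (by simp : ¬ (false = true))]
        rw [← ih s (t ++ [o])]
        apply firstOccs_congr
        intro x
        have ho : o ∈ s := by simpa using hs
        simp only [List.contains_eq_mem, List.mem_append, List.mem_singleton]
        by_cases hxo : x = o <;> simp [hxo, ho]
      · have hs' : s.contains o = false := by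
          cases h' : s.contains o
          · rfl
          · exact absurd h' hs
        rw [if_neg (by simp_all)]
        rw [List.filter_cons, hs']
        simp only [Bool.not_false]
        rw [← ih s (t ++ [o])]
        have : s ++ (t ++ [o]) = (s ++ t) ++ [o] := by simp
        rw [this]
        simp

lemma firstOccs_nil_filter (l s : List String) :
    firstOccs l s = (firstOccs l []).filter (fun x => !s.contains x) := by
  have := firstOccs_append_left l s []
  simpa using this

lemma filter_firstOccs_snoc (p : String → Bool) (o : String) (hp : p o = false) :
    ∀ (l P : List String),
      (firstOccs l (P ++ [o])).filter p = (firstOccs l P).filter p := by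
  intro l P
  rw [firstOccs_nil_filter l (P ++ [o]), firstOccs_nil_filter l P,
      List.filter_filter, List.filter_filter]
  apply List.filter_congr
  intro x _
  by_cases hxo : x = o
  · subst hxo; simp [hp]
  · simp [List.contains_eq_mem, hxo]

-- A's inner loop over `elements` at one prefix
lemma innerA (pre : String) : ∀ (l P acc : List String),
    l.foldl
      (fun (st : PySem.Set String × List String) other =>
        if PySem.Set.contains st.1 other then st
        else if PySem.Str.startswith other pre then
          (PySem.Set.add st.1 other, st.2 ++ [other])
        else st)
      (P, acc)
    = (P ++ (firstOccs l P).filter (fun o => PySem.Str.startswith o pre),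
       acc ++ (firstOccs l P).filter (fun o => PySem.Str.startswith o pre)) := by
  intro l
  induction l with
  | nil => intro P acc; simp [firstOccs]
  | cons o rest ih =>
    intro P acc
    rw [List.foldl_cons]
    by_cases hc : (P : List String).contains o = true
    · have hsc : PySem.Set.contains P o = true := by
        simpa [PySem.Set.contains] using hc
      rw [if_pos hsc]
      rw [ih P acc]
      simp only [firstOccs, hc, if_pos]
    · have hsc : ¬ PySem.Set.contains P o = true := by
        simpa [PySem.Set.contains] using hc
      rw [if_neg hsc]
      have hoP : o ∉ P := by simpa using hc
      have hadd : PySem.Set.add P o = P ++ [o] := by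
        simp [PySem.Set.add, PySem.Set.contains, hoP]
      by_cases hm : PySem.Str.startswith o pre = true
      · rw [if_pos hm]
        rw [hadd, ih (P ++ [o]) (acc ++ [o])]
        have hY : (firstOccs (o :: rest) P).filter (fun x => PySem.Str.startswith x pre)
            = o :: (firstOccs rest (P ++ [o])).filter (fun x => PySem.Str.startswith x pre) := by
          have hmC : PySem.Chars.startswith o.toList pre.toList = true := by simpa using hm
          simp only [firstOccs, if_neg hc]
          simp [hmC]
        rw [hY]
        simp
      · rw [if_neg hm]
        rw [ih P acc]
        have hm' : PySem.Str.startswith o pre = false := by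
          cases h' : PySem.Str.startswith o pre
          · rfl
          · exact absurd h' hm
        have hY : (firstOccs (o :: rest) P).filter (fun x => PySem.Str.startswith x pre)
            = (firstOccs rest P).filter (fun x => PySem.Str.startswith x pre) := by
          simp only [firstOccs, if_neg hc]
          simp only [List.filter_cons, hm', Bool.false_eq_true, if_false]
          exact filter_firstOccs_snoc _ o hm' rest P
        rw [hY]

-- score of an element against `element` (e = element.toList), and the keep test
def pvKey (e : List Char) (o : String) : Int := max 1 ((lcpN o.toList e : Nat) : Int)

def pvKeep (e : List Char) (o : String) : Bool := decide (min 1 e.length ≤ lcpN o.toList e)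

def pvG (e : List Char) (elements : List String) (j : Int) : List String :=
  (firstOccs elements []).filter (fun o => pvKeep e o && (pvKey e o == j))

-- the startswith test at prefix length i, rephrased through the score
lemma match_eq (element : String) (o : String) (i : Int) (h1 : 1 ≤ i)
    (h2 : i ≤ max 1 (element.toList.length : Int)) :
    PySem.Str.startswith o (PySem.Str.slice element none (some i))
      = (pvKeep element.toList o && decide (i ≤ pvKey element.toList o)) := by
  have h0 : 0 ≤ i := by omega
  have hsl : (PySem.Str.slice element none (some i)).toList
      = element.toList.take i.toNat := by
    simp [PySem.List.slice_to _ h0]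
  have hlhs : PySem.Str.startswith o (PySem.Str.slice element none (some i))
      = PySem.Chars.startswith o.toList (element.toList.take i.toNat) := by
    simp [hsl]
  rw [hlhs, startswith_take]
  unfold pvKeep pvKey
  rw [← Bool.decide_and, decide_eq_decide]
  have hle := lcpN_le o.toList element.toList
  omega

-- the keep test is the i = 1 instance
lemma keep_eq (element : String) (o : String) :
    PySem.Str.startswith o (PySem.Str.slice element none (some 1))
      = pvKeep element.toList o := by
  have h := match_eq element o 1 (by omega) (by simp)
  rw [h]
  have : decide ((1 : Int) ≤ pvKey element.toList o) = true := by
    simp [pvKey]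
  rw [this, Bool.and_true]

-- pointwise bridge: match-at-i vs (keep, key) test, as one Bool identity
lemma band_decide_eq_beq (K' j : Int) :
    (decide (j ≤ K') && !decide (j < K')) = (K' == j) := by
  rw [Bool.eq_iff_iff]
  simp only [Bool.and_eq_true, Bool.not_eq_true', decide_eq_true_eq,
    decide_eq_false_iff_not, beq_iff_eq]
  omega

lemma mem_pvG_iff (e : List Char) (elements : List String) (j : Int) (x : String) :
    x ∈ pvG e elements j ↔ (x ∈ elements ∧ pvKeep e x = true ∧ pvKey e x = j) := by
  simp [pvG, List.mem_filter, mem_firstOccs, beq_iff_eq]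

-- B's scoring pass: what each bucket holds
lemma bucketsB (element : String) : ∀ (l : List String) (s : List String)
    (d : PySem.Dict Int (List String)) (i : Int),
    ((l.foldl
      (fun (st : PySem.Set String × PySem.Dict Int (List String)) other =>
        if PySem.Set.contains st.1 other then st
        else
          let seen := PySem.Set.add st.1 other
          if PySem.Str.startswith other (PySem.Str.slice element none (some 1)) then
            let m := lpmLcp other.toList element.toList 0
            (seen, st.2.modify (max 1 m) [] (· ++ [other]))
          else (seen, st.2))
      (s, d)).2).getD i []
    = d.getD i [] ++ (firstOccs l s).filter
        (fun o => pvKeep element.toList o && (pvKey element.toList o == i)) := by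
  intro l
  induction l with
  | nil => intro s d i; simp [firstOccs]
  | cons o rest ih =>
    intro s d i
    rw [List.foldl_cons]
    by_cases hc : s.contains o = true
    · have hsc : PySem.Set.contains s o = true := by
        simpa [PySem.Set.contains] using hc
      rw [if_pos hsc]
      rw [ih s d i]
      simp only [firstOccs, hc, if_pos]
    · have hsc : ¬ PySem.Set.contains s o = true := by
        simpa [PySem.Set.contains] using hc
      rw [if_neg hsc]
      have hoP : o ∉ s := by simpa using hc
      have hadd : PySem.Set.add s o = s ++ [o] := by
        simp [PySem.Set.add, PySem.Set.contains, hoP]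
      simp only [keep_eq element o, hadd]
      by_cases hk : pvKeep element.toList o = true
      · rw [if_pos hk]
        rw [ih (s ++ [o]) _ i]
        have hkey : max 1 (lpmLcp o.toList element.toList 0) = pvKey element.toList o := by
          rw [lpmLcp_eq_lcpN]
          simp [pvKey]
        rw [hkey]
        rw [PySem.Dict.getD_modify]
        have hfo : firstOccs (o :: rest) s = o :: firstOccs rest (s ++ [o]) := by
          simp only [firstOccs, if_neg hc]
        rw [hfo]
        by_cases hik : i = pvKey element.toList o
        · rw [if_pos hik]
          rw [List.filter_cons_of_pos (by simp [hk, hik])]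
          simp [hik]
        · rw [if_neg hik]
          rw [List.filter_cons_of_neg (by simp [hk]; exact fun h => hik h.symm)]
      · rw [if_neg hk]
        rw [ih (s ++ [o]) d i]
        have hk' : pvKeep element.toList o = false := by
          cases h' : pvKeep element.toList o
          · rfl
          · exact absurd h' hk
        have hfo : firstOccs (o :: rest) s = o :: firstOccs rest (s ++ [o]) := by
          simp only [firstOccs, if_neg hc]
        rw [hfo, List.filter_cons_of_neg (by simp [hk'])]

-- A's outer loop, with the set characterised
lemma outerA (element : String) (elements : List String) : ∀ (k : Nat)
    (hk : (k : Int) ≤ max 1 (element.toList.length : Int)) (P acc : List String)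
    (hP : ∀ x, P.contains x = (elements.contains x && pvKeep element.toList x
                                && decide ((k : Int) < pvKey element.toList x))),
    ((PySem.List.pyRange (k : Int) 0 (-1)).foldl
      (fun (st : PySem.Set String × List String) i =>
        let pre := PySem.Str.slice element none (some i)
        elements.foldl
          (fun (st : PySem.Set String × List String) other =>
            if PySem.Set.contains st.1 other then st
            else if PySem.Str.startswith other pre then
              (PySem.Set.add st.1 other, st.2 ++ [other])
            else st) st)
      (P, acc)).2
    = acc ++ (PySem.List.pyRange (k : Int) 0 (-1)).flatMap (pvG element.toList elements) := by
  intro k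
  induction k with
  | zero =>
    intro _ P acc _
    rw [PySem.List.pyRange_neg_one_eq_nil (by norm_num)]
    simp
  | succ k ih =>
    intro hk P acc hP
    have hcast : ((k + 1 : Nat) : Int) - 1 = (k : Int) := by push_cast; ring
    rw [PySem.List.pyRange_neg_one_cons (by push_cast; omega), hcast, List.foldl_cons,
      List.flatMap_cons]
    rw [innerA]
    -- the stage yield is exactly the ((k+1))-bucket
    have hY : (firstOccs elements P).filter
          (fun o => PySem.Str.startswith o (PySem.Str.slice element none (some ((k + 1 : Nat) : Int))))
        = pvG element.toList elements ((k + 1 : Nat) : Int) := by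
      rw [firstOccs_nil_filter elements P, List.filter_filter]
      unfold pvG
      apply List.filter_congr
      intro x hx
      have hxel : x ∈ elements := ((mem_firstOccs elements [] x).mp hx).1
      have hxel' : elements.contains x = true := by simpa using hxel
      rw [match_eq element x _ (by push_cast; omega) (by push_cast at hk ⊢; omega)]
      rw [hP x, hxel', Bool.true_and]
      by_cases hkp : pvKeep element.toList x = true
      · rw [hkp]
        simp only [Bool.true_and]
        exact band_decide_eq_beq _ _
      · have : pvKeep element.toList x = false := by
          cases h' : pvKeep element.toList x
          · rfl
          · exact absurd h' hkp
        rw [this]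
        simp
    rw [hY]
    have hP' : ∀ x, (P ++ pvG element.toList elements ((k + 1 : Nat) : Int)).contains x
        = (elements.contains x && pvKeep element.toList x
            && decide ((k : Int) < pvKey element.toList x)) := by
      intro x
      have hPx := hP x
      rw [Bool.eq_iff_iff] at hPx ⊢
      simp only [List.contains_eq_mem, decide_eq_true_eq, Bool.and_eq_true] at hPx ⊢
      rw [List.mem_append, mem_pvG_iff]
      by_cases hxel : x ∈ elements
      · by_cases hkp : pvKeep element.toList x = true
        · simp only [hxel, hkp, true_and, and_true] at hPx ⊢
          constructor
          · rintro (h | h)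
            · have := hPx.mp h; omega
            · omega
          · intro h
            by_cases hgt : ((k + 1 : Nat) : Int) < pvKey element.toList x
            · exact Or.inl (hPx.mpr hgt)
            · push_cast at h hgt ⊢
              exact Or.inr (by omega)
        · simp only [hkp] at hPx
          simp [hPx, hkp, hxel]
      · have : x ∉ P := fun h => hxel (by
          have := hPx.mp h; tauto)
        simp [this, hxel]
    have := ih (by push_cast at hk ⊢; omega) _ (acc ++ pvG element.toList elements ((k + 1 : Nat) : Int)) hP'
    rw [this]
    simp [List.append_assoc]

-- ===== VERDICT (by name: the statement is the Claim_ definition above) =====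
theorem list_prefix_matches_spec : Claim_equal_list_prefix_matches := by
  intro element elements _
  unfold Spec_list_prefix_matches
  have hlen : PySem.Str.len element = (element.toList.length : Int) := by simp
  have hL : max 1 (PySem.Str.len element)
      = ((max 1 element.toList.length : Nat) : Int) := by
    rw [hlen, Nat.cast_max]; norm_num
  have hA : list_prefix_matches element elements
      = (PySem.List.pyRange ((max 1 element.toList.length : Nat) : Int) 0 (-1)).flatMap
          (pvG element.toList elements) := by
    unfold list_prefix_matches
    rw [hL]
    have hP0 : ∀ x, (PySem.Set.empty : List String).contains x
        = (elements.contains x && pvKeep element.toList x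
            && decide (((max 1 element.toList.length : Nat) : Int) < pvKey element.toList x)) := by
      intro x
      have hle := lcpN_le x.toList element.toList
      have hdec : decide (((max 1 element.toList.length : Nat) : Int)
          < pvKey element.toList x) = false := by
        simp only [pvKey, decide_eq_false_iff_not]
        push_cast
        omega
      rw [hdec]
      simp [PySem.Set.empty]
    have h := outerA element elements (max 1 element.toList.length)
      (by push_cast; omega) PySem.Set.empty [] hP0
    rw [List.nil_append] at h
    exact h
  have hbt : ∀ i : Int,
      ((elements.foldl
        (fun (st : PySem.Set String × PySem.Dict Int (List String)) other =>
          if PySem.Set.contains st.1 other then st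
          else
            let seen := PySem.Set.add st.1 other
            if PySem.Str.startswith other (PySem.Str.slice element none (some 1)) then
              let m := lpmLcp other.toList element.toList 0
              (seen, st.2.modify (max 1 m) [] (· ++ [other]))
            else (seen, st.2))
        (PySem.Set.empty, PySem.Dict.empty)).2).getD i []
      = pvG element.toList elements i := by
    intro i
    have h := bucketsB element elements PySem.Set.empty PySem.Dict.empty i
    rw [h]
    simp [pvG, PySem.Set.empty]
  have hB : list_prefix_matches_alt element elements
      = (PySem.List.pyRange ((max 1 element.toList.length : Nat) : Int) 0 (-1)).flatMap
          (pvG element.toList elements) := by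
    unfold list_prefix_matches_alt
    rw [hL]
    rw [PySem.List.foldl_append_eq_flatMap]
    rw [List.nil_append]
    congr 1
    funext i
    exact hbt i
  rw [hA, hB]
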